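-- pv_equiv track=rewrite | github.com/YaelBenYair/Python-course | in_lesson/x_2/x_2.py | money_amount_re
-- ===== SOURCE A (Python) =====
-- def money_amount_re(l_list, level, amounts) -> int:
--     count = 0
--     if level > 1:
--         return amounts
--
--     for i in range(2, 4):
--         for l in range(level, len(l_list), i):
--             count += l_list[l]
--         if count > amounts:
--             amounts = count
--         count = 0
--     return money_amount_re(l_list, level+1, amounts)
-- ===== SOURCE B (Python) =====
-- def _strided_sum(lst, k):
--     # sum of every k-th element of lst starting at index 0
--     total = 0
--     while lst:
--         total += lst[0]
--         lst = lst[k:]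
--     return total
--
--
-- def money_amount_re(l_list, level, amounts):
--     best = amounts
--     for lvl in range(level, 2):
--         for step in (2, 3):
--             best = max(best, _strided_sum(l_list[lvl:], step))
--     return best
-- ===== Notes on version B (the rewrite author's own statement) =====
-- stated objective: simpler
-- what changed: Replaces the recursion over level and the index-counting inner loops by a flat for-loop over range(level, 2) that takes max of strided slice sums computed by a list-consuming helper.
-- outside the precondition, e.g. on money_amount_re([1, 2, 3], -1, 0): A returns 6, B returns 4
import Mathlib
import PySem

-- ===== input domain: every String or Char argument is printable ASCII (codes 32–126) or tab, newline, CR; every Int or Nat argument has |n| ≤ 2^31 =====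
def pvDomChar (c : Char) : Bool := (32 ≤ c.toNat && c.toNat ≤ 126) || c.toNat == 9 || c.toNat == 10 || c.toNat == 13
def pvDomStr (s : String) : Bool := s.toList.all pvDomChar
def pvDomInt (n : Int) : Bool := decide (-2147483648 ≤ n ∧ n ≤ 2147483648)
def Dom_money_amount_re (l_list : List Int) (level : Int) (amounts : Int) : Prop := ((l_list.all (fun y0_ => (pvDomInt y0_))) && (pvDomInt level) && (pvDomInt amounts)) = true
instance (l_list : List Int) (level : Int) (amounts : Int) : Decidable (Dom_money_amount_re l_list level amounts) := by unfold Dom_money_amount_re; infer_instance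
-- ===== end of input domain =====

-- B replaces A's recursion over `level` plus index-counting inner loops by a flat
-- loop over range(level, 2) taking the max of strided slice sums (objective: simpler).

-- ===== PORT A =====
def money_amount_re (l_list : List Int) (level : Int) (amounts : Int) : Int :=
  if level > 1 then amounts
  else
    money_amount_re l_list (level + 1)
      ((PySem.List.pyRange 2 4 1).foldl
        (fun amounts i =>
          let count :=
            (PySem.List.pyRange level (l_list.length : Int) i).foldl
              (fun count l => count + PySem.List.pyGetD l_list l 0) 0
          if count > amounts then count else amounts)
        amounts)
termination_by (2 - level).toNat
decreasing_by
  rename_i h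
  simp only [not_lt] at h
  omega

-- ===== PORT B =====
-- B's helper: total = 0; while lst: total += lst[0]; lst = lst[k:]
def stridedSum : List Int → Nat → Int
  | [], _ => 0
  | x :: t, k => x + stridedSum (t.drop (k - 1)) k
termination_by lst _ => lst.length
decreasing_by
  simp only [List.length_drop, List.length_cons]
  omega

def money_amount_re_alt (l_list : List Int) (level : Int) (amounts : Int) : Int :=
  (PySem.List.pyRange level 2 1).foldl
    (fun best lvl =>
      ([2, 3] : List Nat).foldl
        (fun b k => max b (stridedSum (PySem.List.slice l_list (some lvl) none) k)) best)
    amounts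

-- ===== PRECONDITION & SPEC =====
-- Pre_ restricts to the function's natural domain, non-negative recursion levels: for
-- level < 0 A raises IndexError when level < -len(l_list) and otherwise returns sums
-- built from negative-index wraparound, an artefact B does not mirror.
def Pre_money_amount_re (l_list : List Int) (level : Int) (amounts : Int) : Prop := 0 ≤ level
instance (l_list : List Int) (level : Int) (amounts : Int) : Decidable (Pre_money_amount_re l_list level amounts) := by unfold Pre_money_amount_re; infer_instance

def pvWitness_money_amount_re : List Int × Int × Int := ([1, 2, 3], 0, 0)

def Spec_money_amount_re (l_list : List Int) (level : Int) (amounts : Int) (out : Int) : Prop := out = money_amount_re_alt l_list level amounts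
instance (l_list : List Int) (level : Int) (amounts : Int) (out : Int) : Decidable (Spec_money_amount_re l_list level amounts out) := by unfold Spec_money_amount_re; infer_instance

-- ===== CLAIM (what is proved, stated in full; the proofs are below) =====
def Claim_equal_money_amount_re : Prop := ∀ (l_list : List Int) (level : Int) (amounts : Int), Dom_money_amount_re l_list level amounts → Pre_money_amount_re l_list level amounts → Spec_money_amount_re l_list level amounts (money_amount_re l_list level amounts)

-- ===== LEMMAS AND PROOFS =====

-- a positive-step range is empty past its stop
lemma pyRange_pos_nil (a b k : Int) (hk : 0 < k) (hba : b ≤ a) :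
    PySem.List.pyRange a b k = [] := by
  rw [PySem.List.pyRange_of_pos _ _ hk, if_neg (by omega)]
  simp

-- a positive-step range unrolls one element at a time
lemma pyRange_pos_cons (a b k : Int) (hk : 0 < k) (hab : a < b) :
    PySem.List.pyRange a b k = a :: PySem.List.pyRange (a + k) b k := by
  rw [PySem.List.pyRange_of_pos _ _ hk, PySem.List.pyRange_of_pos _ _ hk, if_pos hab]
  by_cases h : a + k < b
  · rw [if_pos h]
    have hnum : b - a + k - 1 = (b - (a + k) + k - 1) + 1 * k := by ring
    have hdiv : (b - a + k - 1) / k = (b - (a + k) + k - 1) / k + 1 := by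
      rw [hnum, Int.add_mul_ediv_right _ _ (by omega)]
    have hpos : 0 ≤ (b - (a + k) + k - 1) / k := by
      apply Int.ediv_nonneg <;> omega
    have hcnt : ((b - a + k - 1) / k).toNat = ((b - (a + k) + k - 1) / k).toNat + 1 := by omega
    rw [hcnt, List.range_succ_eq_map]
    simp only [List.map_cons, List.map_map]
    congr 1
    · push_cast; ring
    apply List.map_congr_left
    intro j _
    simp only [Function.comp]
    push_cast
    ring
  · rw [if_neg h]
    have h1 : 0 < b - a ∧ b - a ≤ k := by omega
    have hdiv : (b - a + k - 1) / k = 1 := by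
      rw [← PySem.Int.floordiv_eq_ediv_of_pos hk, PySem.Int.floordiv_eq_iff_of_pos hk]
      constructor <;> nlinarith [h1.1, h1.2]
    rw [hdiv]
    simp

-- A's strided index sum over range(a, len, k) equals B's stridedSum of the dropped list
lemma strided_eq_aux (xs : List Int) (k : Nat) (hk : 0 < k) :
    ∀ (n : Nat) (a : Int), 0 ≤ a → xs.length ≤ a.toNat + n →
      ((PySem.List.pyRange a (xs.length : Int) (k : Int)).map
          (fun l => PySem.List.pyGetD xs l 0)).sum
        = stridedSum (xs.drop a.toNat) k := by
  intro n
  induction n with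
  | zero =>
    intro a ha hle
    rw [pyRange_pos_nil _ _ _ (by exact_mod_cast hk) (by omega),
        List.drop_eq_nil_of_le (by omega)]
    simp [stridedSum]
  | succ n ih =>
    intro a ha hle
    by_cases h : (xs.length : Int) ≤ a
    · rw [pyRange_pos_nil _ _ _ (by exact_mod_cast hk) h,
          List.drop_eq_nil_of_le (by omega)]
      simp [stridedSum]
    · push Not at h
      have hlt : a.toNat < xs.length := by omega
      rw [pyRange_pos_cons _ _ _ (by exact_mod_cast hk) h]
      rw [List.map_cons, List.sum_cons]
      rw [PySem.List.pyGetD_eq_getElem xs 0 ha (by omega)]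
      rw [List.drop_eq_getElem_cons hlt]
      rw [stridedSum]
      have hdd : (List.drop (a.toNat + 1) xs).drop (k - 1) = List.drop (a.toNat + k) xs := by
        rw [List.drop_drop]
        congr 1
        omega
      rw [hdd]
      have hIH := ih (a + (k : Int)) (by omega) (by omega)
      have hts : (a + (k : Int)).toNat = a.toNat + k := by omega
      rw [hts] at hIH
      rw [hIH]

-- one level of A's stride loop equals one step of B's max-of-slice-sums loop
lemma inner_eq (xs : List Int) (lvl : Int) (h : 0 ≤ lvl) (am : Int) :
    (PySem.List.pyRange 2 4 1).foldl
        (fun amounts i =>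
          let count :=
            (PySem.List.pyRange lvl (xs.length : Int) i).foldl
              (fun count l => count + PySem.List.pyGetD xs l 0) 0
          if count > amounts then count else amounts) am
      = ([2, 3] : List Nat).foldl
          (fun b k => max b (stridedSum (PySem.List.slice xs (some lvl) none) k)) am := by
  have h24 : PySem.List.pyRange 2 4 1 = [2, 3] := by decide
  have key : ∀ i : Nat, 0 < i →
      (PySem.List.pyRange lvl (xs.length : Int) (i : Int)).foldl
          (fun count l => count + PySem.List.pyGetD xs l 0) 0
        = stridedSum (PySem.List.slice xs (some lvl) none) i := by
    intro i hi
    rw [PySem.List.foldl_add, PySem.List.slice_from xs h, zero_add]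
    exact strided_eq_aux xs i hi xs.length lvl h (by omega)
  have k2 := key 2 (by norm_num)
  have k3 := key 3 (by norm_num)
  push_cast at k2 k3
  rw [h24]
  simp only [List.foldl_cons, List.foldl_nil, k2, k3]
  split_ifs <;> omega

lemma main_eq (xs : List Int) :
    ∀ (n : Nat) (level amounts : Int), (2 - level).toNat ≤ n → 0 ≤ level →
      money_amount_re xs level amounts = money_amount_re_alt xs level amounts := by
  intro n
  induction n with
  | zero =>
    intro level amounts hn h0
    have h2 : level > 1 := by omega
    rw [money_amount_re, if_pos h2]
    unfold money_amount_re_alt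
    rw [pyRange_pos_nil _ _ _ one_pos (by omega), List.foldl_nil]
  | succ n ih =>
    intro level amounts hn h0
    by_cases h2 : level > 1
    · rw [money_amount_re, if_pos h2]
      unfold money_amount_re_alt
      rw [pyRange_pos_nil _ _ _ one_pos (by omega), List.foldl_nil]
    · rw [money_amount_re, if_neg h2]
      rw [ih (level + 1) _ (by omega) (by omega)]
      unfold money_amount_re_alt
      rw [pyRange_pos_cons level 2 1 one_pos (by omega), List.foldl_cons]
      congr 1
      exact inner_eq xs level h0 amounts

-- ===== VERDICT (by name: the statement is the Claim_ definition above) =====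
theorem money_amount_re_spec : Claim_equal_money_amount_re := by
  intro l_list level amounts _ hpre
  exact main_eq l_list (2 - level).toNat level amounts le_rfl hpre
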